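-- pv_equiv track=rewrite | github.com/ringger/basicoco | emulator/io.py | _split_print_arguments_with_separators
-- ===== SOURCE A (Python) =====
-- def _split_print_arguments_with_separators(args):
--     """Split PRINT arguments by semicolon/comma, preserving separator info"""
--     parts_with_separators = []
--     current_part = ""
--     in_string = False
--     paren_depth = 0
--
--     for char in args:
--         if char == '"':
--             in_string = not in_string
--             current_part += char
--         elif char == '(' and not in_string:
--             paren_depth += 1
--             current_part += char
--         elif char == ')' and not in_string:
--             paren_depth -= 1
--             current_part += char
--         elif char in [';', ','] and not in_string and paren_depth == 0:
--             # Store the part with its separator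
--             parts_with_separators.append((current_part, char))
--             current_part = ""
--         else:
--             current_part += char
--
--     # Check if the string ends with a separator (indicates no newline)
--     trailing_separator = args.rstrip()[-1:] if args.rstrip() and args.rstrip()[-1] in [';', ','] else None
--
--     # Add the last part with trailing separator info
--     parts_with_separators.append((current_part, trailing_separator))
--     return parts_with_separators
-- ===== SOURCE B (Python) =====
-- def _split_print_arguments_with_separators(args):
--     """Split PRINT arguments by semicolon/comma, preserving separator info"""
--     # Pass 1: record (index, char) of every top-level separator.
--     bounds = []
--     in_string = False
--     paren_depth = 0
--     for i, ch in enumerate(args):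
--         if ch == '"':
--             in_string = not in_string
--         elif not in_string:
--             if ch == '(':
--                 paren_depth += 1
--             elif ch == ')':
--                 paren_depth -= 1
--             elif paren_depth == 0 and (ch == ';' or ch == ','):
--                 bounds.append((i, ch))
--
--     # Pass 2: slice the argument string between consecutive boundaries.
--     parts_with_separators = []
--     start = 0
--     for i, sep in bounds:
--         parts_with_separators.append((args[start:i], sep))
--         start = i + 1
--
--     stripped = args.rstrip()
--     trailing_separator = stripped[-1] if stripped and (stripped[-1] == ';' or stripped[-1] == ',') else None
--     parts_with_separators.append((args[start:], trailing_separator))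
--     return parts_with_separators
-- ===== Notes on version B (the rewrite author's own statement) =====
-- stated objective: alternative
-- what changed: B replaces A's char-by-char accumulation of current_part with a two-pass scheme: pass 1 records the (index, char) of every top-level separator, pass 2 slices the argument string between consecutive boundaries; the trailing-separator check is unchanged.
import Mathlib
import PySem

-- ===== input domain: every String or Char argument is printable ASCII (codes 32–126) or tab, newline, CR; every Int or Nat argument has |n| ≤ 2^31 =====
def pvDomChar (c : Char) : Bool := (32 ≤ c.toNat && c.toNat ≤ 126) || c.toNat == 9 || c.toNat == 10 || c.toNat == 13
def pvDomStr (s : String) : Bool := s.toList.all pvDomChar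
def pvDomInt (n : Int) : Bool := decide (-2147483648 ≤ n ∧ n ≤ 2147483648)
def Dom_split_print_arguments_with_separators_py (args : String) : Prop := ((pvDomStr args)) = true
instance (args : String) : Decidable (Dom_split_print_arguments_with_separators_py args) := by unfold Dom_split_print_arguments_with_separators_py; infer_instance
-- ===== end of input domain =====

-- B replaces A's character-by-character accumulation of current_part by a two-pass scheme
-- (pass 1: collect top-level separator positions; pass 2: slice the string between them);
-- objective: alternative decomposition, same O(n) cost.

-- ===== PORT A =====
-- the 'for char in args' loop: state (parts_with_separators, current_part, in_string, paren_depth)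
def pvALoop : List Char → List (String × Option String) → List Char → Bool → Int →
    List (String × Option String) × List Char
  | [], parts, cur, _, _ => (parts, cur)
  | c :: cs, parts, cur, inStr, depth =>
    if c = '"' then pvALoop cs parts (cur ++ [c]) (!inStr) depth
    else if c = '(' ∧ inStr = false then pvALoop cs parts (cur ++ [c]) inStr (depth + 1)
    else if c = ')' ∧ inStr = false then pvALoop cs parts (cur ++ [c]) inStr (depth - 1)
    else if (c = ';' ∨ c = ',') ∧ inStr = false ∧ depth = 0 then
      pvALoop cs (parts ++ [(String.ofList cur, some (String.ofList [c]))]) [] inStr depth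
    else pvALoop cs parts (cur ++ [c]) inStr depth

-- args.rstrip()[-1:] if args.rstrip() and args.rstrip()[-1] in [';', ','] else None
-- (the truthiness guard 'args.rstrip()' is exactly 'pyGet? rs (-1) ≠ none')
def pvTrailA (args : String) : Option String :=
  match PySem.List.pyGet? (PySem.Chars.rstrip args.toList) (-1) with
  | some c => if c = ';' ∨ c = ',' then
      some (String.ofList (PySem.List.slice (PySem.Chars.rstrip args.toList) (some (-1)) none))
    else none
  | none => none

def split_print_arguments_with_separators_py (args : String) : List (String × Option String) :=
  let r := pvALoop args.toList [] [] false 0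
  r.1 ++ [(String.ofList r.2, pvTrailA args)]

-- ===== PORT B =====
-- pass 1 of Source B: 'for i, ch in enumerate(args)' collecting (i, ch) of top-level separators
def pvBBounds : List (Int × Char) → Bool → Int → List (Int × Char)
  | [], _, _ => []
  | (i, c) :: rest, inStr, depth =>
    if c = '"' then pvBBounds rest (!inStr) depth
    else if inStr = false then
      if c = '(' then pvBBounds rest inStr (depth + 1)
      else if c = ')' then pvBBounds rest inStr (depth - 1)
      else if depth = 0 ∧ (c = ';' ∨ c = ',') then (i, c) :: pvBBounds rest inStr depth
      else pvBBounds rest inStr depth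
    else pvBBounds rest inStr depth

-- pass 2 body: parts.append((args[start:i], sep)); start = i + 1
def pvBStep (cs : List Char) (acc : List (String × Option String) × Int) (p : Int × Char) :
    List (String × Option String) × Int :=
  (acc.1 ++ [(String.ofList (PySem.List.slice cs (some acc.2) (some p.1)), some (String.ofList [p.2]))], p.1 + 1)

-- stripped[-1] if stripped and stripped[-1] in (';', ',') else None  (guard = 'pyGet? ≠ none' as in A)
def pvTrailB (args : String) : Option String :=
  match PySem.List.pyGet? (PySem.Chars.rstrip args.toList) (-1) with
  | some c => if c = ';' ∨ c = ',' then some (String.ofList [c]) else none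
  | none => none

def split_print_arguments_with_separators_py_alt (args : String) : List (String × Option String) :=
  let cs := args.toList
  let r := (pvBBounds (PySem.List.enumerate cs 0) false 0).foldl (pvBStep cs) ([], 0)
  r.1 ++ [(String.ofList (PySem.List.slice cs (some r.2) none), pvTrailB args)]

-- ===== PRECONDITION & SPEC =====
def Spec_split_print_arguments_with_separators_py (args : String) (out : List (String × Option String)) : Prop := out = split_print_arguments_with_separators_py_alt args
instance (args : String) (out : List (String × Option String)) : Decidable (Spec_split_print_arguments_with_separators_py args out) := by unfold Spec_split_print_arguments_with_separators_py; infer_instance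

-- ===== CLAIM (what is proved, stated in full; the proofs are below) =====
def Claim_equal_split_print_arguments_with_separators_py : Prop := ∀ (args : String), Dom_split_print_arguments_with_separators_py args → Spec_split_print_arguments_with_separators_py args (split_print_arguments_with_separators_py args)

-- ===== LEMMAS AND PROOFS =====

-- extending A's current_part by the next character = extending the slice by one position
lemma pv_take_snoc (full : List Char) (start k : Nat) (c : Char)
    (hc : full[k]? = some c) (hs : start ≤ k) :
    (full.drop start).take (k - start) ++ [c] = (full.drop start).take (k + 1 - start) := by
  have h1 : (full.drop start)[k - start]? = some c := by
    rw [List.getElem?_drop]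
    rwa [Nat.add_sub_cancel' hs]
  have h2 : k + 1 - start = (k - start) + 1 := by omega
  rw [h2, List.take_add_one, h1]
  rfl

-- the main invariant: A's loop from state (parts, args[start:k], s, d) at position k
-- equals B's pass-2 fold over the bounds pass 1 finds from position k onward in state (s, d).
lemma pv_main (full : List Char) (rest : List Char) :
    ∀ (k start : Nat) (parts : List (String × Option String)) (s : Bool) (d : Int),
    full.drop k = rest → start ≤ k → k ≤ full.length →
    ∃ m : Nat, m ≤ full.length ∧
      (pvBBounds (PySem.List.enumerate rest (k : Int)) s d).foldl (pvBStep full) (parts, (start : Int))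
        = ((pvALoop rest parts ((full.drop start).take (k - start)) s d).1, (m : Int)) ∧
      (pvALoop rest parts ((full.drop start).take (k - start)) s d).2 = full.drop m := by
  induction rest with
  | nil =>
    intro k start parts s d hdrop hsk hk
    have hkl : full.length ≤ k := List.drop_eq_nil_iff.mp hdrop
    have hkeq : k = full.length := le_antisymm hk hkl
    refine ⟨start, by omega, ?_, ?_⟩
    · simp [PySem.List.enumerate, pvBBounds, pvALoop]
    · simp only [pvALoop]
      subst hkeq
      exact List.take_of_length_le (by simp)
  | cons c cs ih =>
    intro k start parts s d hdrop hsk hk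
    have hklt : k < full.length := by
      by_contra h
      have : full.drop k = [] := List.drop_eq_nil_iff.mpr (by omega)
      rw [hdrop] at this; simp at this
    have hc : full[k]? = some c := by
      have : (full.drop k)[0]? = some c := by rw [hdrop]; rfl
      rwa [List.getElem?_drop, Nat.add_zero] at this
    have hcs : full.drop (k + 1) = cs := by
      have h1 : (full.drop k).drop 1 = full.drop (k + 1) := by
        rw [List.drop_drop]
      rw [← h1, hdrop]; rfl
    have henum : PySem.List.enumerate (c :: cs) (k : Int)
        = ((k : Int), c) :: PySem.List.enumerate cs ((k + 1 : Nat) : Int) := by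
      rw [PySem.List.enumerate_cons]; push_cast; ring_nf
    have hsnoc := pv_take_snoc full start k c hc hsk
    by_cases hq : c = '"'
    · simp only [henum, pvBBounds, pvALoop, if_pos hq, hsnoc]
      exact ih (k + 1) start parts (!s) d hcs (by omega) (by omega)
    · by_cases hstr : s = false
      · by_cases hop : c = '('
        · simp only [henum, pvBBounds, pvALoop, if_neg hq, if_pos hstr, if_pos hop,
            if_pos (show c = '(' ∧ s = false from ⟨hop, hstr⟩), hsnoc]
          exact ih (k + 1) start parts s (d + 1) hcs (by omega) (by omega)
        · by_cases hcl : c = ')'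
          · simp only [henum, pvBBounds, pvALoop, if_neg hq, if_pos hstr, if_neg hop, if_pos hcl,
              if_neg (show ¬(c = '(' ∧ s = false) from fun h => hop h.1),
              if_pos (show c = ')' ∧ s = false from ⟨hcl, hstr⟩), hsnoc]
            exact ih (k + 1) start parts s (d - 1) hcs (by omega) (by omega)
          · by_cases hsep : c = ';' ∨ c = ','
            · by_cases hd : d = 0
              · simp only [henum, pvBBounds, pvALoop, if_neg hq, if_pos hstr, if_neg hop, if_neg hcl,
                  if_pos (show d = 0 ∧ (c = ';' ∨ c = ',') from ⟨hd, hsep⟩),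
                  if_neg (show ¬(c = '(' ∧ s = false) from fun h => hop h.1),
                  if_neg (show ¬(c = ')' ∧ s = false) from fun h => hcl h.1),
                  if_pos (show (c = ';' ∨ c = ',') ∧ s = false ∧ d = 0 from ⟨hsep, hstr, hd⟩),
                  List.foldl_cons]
                have hstep : pvBStep full (parts, (start : Int)) ((k : Int), c)
                    = (parts ++ [(String.ofList ((full.drop start).take (k - start)), some (String.ofList [c]))],
                       ((k + 1 : Nat) : Int)) := by
                  simp only [pvBStep, PySem.List.slice_natCast]
                  push_cast; ring_nf
                rw [hstep]
                have := ih (k + 1) (k + 1)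
                  (parts ++ [(String.ofList ((full.drop start).take (k - start)), some (String.ofList [c]))])
                  s d hcs (by omega) (by omega)
                simpa using this
              · simp only [henum, pvBBounds, pvALoop, if_neg hq, if_pos hstr, if_neg hop, if_neg hcl,
                  if_neg (show ¬(d = 0 ∧ (c = ';' ∨ c = ',')) from fun h => hd h.1),
                  if_neg (show ¬(c = '(' ∧ s = false) from fun h => hop h.1),
                  if_neg (show ¬(c = ')' ∧ s = false) from fun h => hcl h.1),
                  if_neg (show ¬((c = ';' ∨ c = ',') ∧ s = false ∧ d = 0) from fun h => hd h.2.2),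
                  hsnoc]
                exact ih (k + 1) start parts s d hcs (by omega) (by omega)
            · simp only [henum, pvBBounds, pvALoop, if_neg hq, if_pos hstr, if_neg hop, if_neg hcl,
                if_neg (show ¬(d = 0 ∧ (c = ';' ∨ c = ',')) from fun h => hsep h.2),
                if_neg (show ¬(c = '(' ∧ s = false) from fun h => hop h.1),
                if_neg (show ¬(c = ')' ∧ s = false) from fun h => hcl h.1),
                if_neg (show ¬((c = ';' ∨ c = ',') ∧ s = false ∧ d = 0) from fun h => hsep h.1),
                hsnoc]
              exact ih (k + 1) start parts s d hcs (by omega) (by omega)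
      · simp only [henum, pvBBounds, pvALoop, if_neg hq, if_neg hstr,
          if_neg (show ¬(c = '(' ∧ s = false) from fun h => hstr h.2),
          if_neg (show ¬(c = ')' ∧ s = false) from fun h => hstr h.2),
          if_neg (show ¬((c = ';' ∨ c = ',') ∧ s = false ∧ d = 0) from fun h => hstr h.2.1),
          hsnoc]
        exact ih (k + 1) start parts s d hcs (by omega) (by omega)

-- the two trailing-separator computations agree (rs[-1:] on a nonempty list is [rs[-1]])
lemma pv_trail_eq (args : String) : pvTrailA args = pvTrailB args := by
  unfold pvTrailA pvTrailB
  rcases List.eq_nil_or_concat (PySem.Chars.rstrip args.toList) with h | ⟨ys, y, h⟩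
  · rw [h]
    rfl
  · rw [List.concat_eq_append] at h
    rw [h, PySem.List.pyGet?_neg_one_append_singleton]
    have hsl : PySem.List.slice (ys ++ [y]) (some (-1)) none = [y] := by
      rw [PySem.List.slice_from_neg_one]
      simp
    rw [hsl]

-- ===== VERDICT (by name: the statement is the Claim_ definition above) =====
theorem split_print_arguments_with_separators_py_spec : Claim_equal_split_print_arguments_with_separators_py := by
  intro args _
  unfold Spec_split_print_arguments_with_separators_py
  obtain ⟨m, hm, hfold, hcur⟩ :=
    pv_main args.toList args.toList 0 0 [] false 0 (by simp) (le_refl 0) (by omega)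
  simp only [Nat.cast_zero, Nat.sub_zero, List.drop_zero, List.take_zero] at hfold hcur
  simp only [split_print_arguments_with_separators_py, split_print_arguments_with_separators_py_alt,
    hfold, pv_trail_eq, hcur, PySem.List.slice_from_natCast]
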